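-- pv_equiv track=rewrite | github.com/Luka958Pixion/math-rag | math_rag/infrastructure/utils/template_chunker_util.py | _find_contiguous_block_ranges
-- ===== SOURCE A (Python) =====
-- def _find_contiguous_block_ranges(
--     positions: list[int], lengths: list[int], max_window_size: int
-- ) -> list[tuple[int, int]]:
--     """
--     Split the sequence of placeholders into blocks where gaps between
--     consecutive placeholders do not exceed the window size.
--     Returns a list of (start_index, end_index) ranges into the positions/lengths lists.
--     """
--     blocks: list[tuple[int, int]] = []
--     i = 0
--     n = len(positions)
--
--     while i < n:
--         j = i + 1
--
--         while j < n:
--             previous_end = positions[j - 1] + lengths[j - 1]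
--             gap = positions[j] - previous_end
--
--             if gap > max_window_size:
--                 break
--
--             # extend block
--             j += 1
--
--         blocks.append((i, j))
--         i = j
--
--     return blocks
-- ===== SOURCE B (Python) =====
-- def _find_contiguous_block_ranges(
--     positions: list[int], lengths: list[int], max_window_size: int
-- ) -> list[tuple[int, int]]:
--     n = len(positions)
--     if n == 0:
--         return []
--     breaks = [
--         j
--         for j in range(1, n)
--         if positions[j] - (positions[j - 1] + lengths[j - 1]) > max_window_size
--     ]
--     bounds = [0] + breaks + [n]
--     return list(zip(bounds, bounds[1:]))
-- ===== Notes on version B (the rewrite author's own statement) =====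
-- stated objective: simpler
-- what changed: Replaces the nested while-loop two-pointer block extension with a two-pass decomposition: one comprehension collects the internal break indices, then consecutive boundaries of [0]+breaks+[n] are zipped into ranges.
import Mathlib
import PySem

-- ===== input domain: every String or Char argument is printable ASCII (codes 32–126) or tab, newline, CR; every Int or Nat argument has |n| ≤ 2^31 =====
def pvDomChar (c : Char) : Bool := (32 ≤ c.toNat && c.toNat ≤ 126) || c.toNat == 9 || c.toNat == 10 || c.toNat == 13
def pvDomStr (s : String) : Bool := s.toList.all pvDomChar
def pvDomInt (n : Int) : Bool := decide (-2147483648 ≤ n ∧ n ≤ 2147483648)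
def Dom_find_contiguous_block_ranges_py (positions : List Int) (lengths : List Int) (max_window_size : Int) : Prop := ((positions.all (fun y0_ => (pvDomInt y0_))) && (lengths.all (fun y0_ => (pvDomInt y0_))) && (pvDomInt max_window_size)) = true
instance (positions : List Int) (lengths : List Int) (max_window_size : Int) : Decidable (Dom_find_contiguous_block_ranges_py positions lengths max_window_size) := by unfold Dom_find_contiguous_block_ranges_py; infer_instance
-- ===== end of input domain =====

-- B replaces A's nested while-loop two-pointer extension by a simpler two-pass
-- decomposition: collect the break indices, then pair consecutive boundaries.


-- ===== PORT A =====
-- inner while loop of A: extends j while the gap between placeholder j-1 and j is small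
-- (list indexing is ported with getD 0; Pre_ guarantees every index A reads is in range)
def pvInnerA (positions : List Int) (lengths : List Int) (max_window_size : Int) (n j : Nat) : Nat :=
  if _h : j < n then
    let previous_end := positions.getD (j - 1) 0 + lengths.getD (j - 1) 0
    let gap := positions.getD j 0 - previous_end
    if gap > max_window_size then j
    else pvInnerA positions lengths max_window_size n (j + 1)
  else j
termination_by n - j

-- the inner loop never moves j backwards (cited by pvOuterA's termination proof)
theorem pvInnerA_ge (positions : List Int) (lengths : List Int) (mws : Int) (n j : Nat) :
    j ≤ pvInnerA positions lengths mws n j := by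
  fun_induction pvInnerA with
  | case1 j h prev gap hgap => exact le_refl _
  | case2 j h prev gap hgap ih => omega
  | case3 j h => exact le_refl _

-- outer while loop of A
def pvOuterA (positions : List Int) (lengths : List Int) (max_window_size : Int) (n i : Nat) : List (Int × Int) :=
  if _h : i < n then
    let j := pvInnerA positions lengths max_window_size n (i + 1)
    ((i : Int), (j : Int)) :: pvOuterA positions lengths max_window_size n j
  else []
termination_by n - i
decreasing_by
  have := pvInnerA_ge positions lengths max_window_size n (i + 1)
  omega

def find_contiguous_block_ranges_py (positions : List Int) (lengths : List Int) (max_window_size : Int) : List (Int × Int) :=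
  pvOuterA positions lengths max_window_size positions.length 0

-- ===== PORT B =====
-- gap test of Source B's comprehension at an internal index j
def pvBrk (positions : List Int) (lengths : List Int) (max_window_size : Int) (j : Nat) : Bool :=
  positions.getD j 0 - (positions.getD (j - 1) 0 + lengths.getD (j - 1) 0) > max_window_size

-- list(zip(bounds, bounds[1:])): pair consecutive boundaries
def pvPairUp (bounds : List Nat) : List (Int × Int) :=
  match bounds with
  | a :: b :: rest => ((a : Int), (b : Int)) :: pvPairUp (b :: rest)
  | _ => []

def find_contiguous_block_ranges_py_alt (positions : List Int) (lengths : List Int) (max_window_size : Int) : List (Int × Int) :=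
  let n := positions.length
  if n = 0 then []
  else
    let breaks := (List.range' 1 (n - 1)).filter (pvBrk positions lengths max_window_size)
    let bounds := 0 :: breaks ++ [n]
    pvPairUp bounds

-- ===== PRECONDITION & SPEC =====
-- Pre_ excludes exactly the inputs where Python A raises IndexError: A reads
-- lengths[j-1] for every j in 1..n-1, so it raises iff len(lengths) < len(positions) - 1
-- (B's comprehension reads the same indices and raises on exactly the same inputs).
def Pre_find_contiguous_block_ranges_py (positions : List Int) (lengths : List Int) (max_window_size : Int) : Prop :=
  positions.length ≤ lengths.length + 1
instance (positions : List Int) (lengths : List Int) (max_window_size : Int) : Decidable (Pre_find_contiguous_block_ranges_py positions lengths max_window_size) := by unfold Pre_find_contiguous_block_ranges_py; infer_instance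
def pvWitness_find_contiguous_block_ranges_py : List Int × List Int × Int := ([0, 5, 20, 22], [2, 3, 1, 1], 5)

def Spec_find_contiguous_block_ranges_py (positions : List Int) (lengths : List Int) (max_window_size : Int) (out : List (Int × Int)) : Prop := out = find_contiguous_block_ranges_py_alt positions lengths max_window_size
instance (positions : List Int) (lengths : List Int) (max_window_size : Int) (out : List (Int × Int)) : Decidable (Spec_find_contiguous_block_ranges_py positions lengths max_window_size out) := by unfold Spec_find_contiguous_block_ranges_py; infer_instance

-- ===== CLAIM (what is proved, stated in full; the proofs are below) =====
def Claim_equal_find_contiguous_block_ranges_py : Prop := ∀ (positions : List Int) (lengths : List Int) (max_window_size : Int), Dom_find_contiguous_block_ranges_py positions lengths max_window_size → Pre_find_contiguous_block_ranges_py positions lengths max_window_size → Spec_find_contiguous_block_ranges_py positions lengths max_window_size (find_contiguous_block_ranges_py positions lengths max_window_size)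

-- ===== LEMMAS AND PROOFS =====

-- the inner loop returns the first break index ≥ its start, or n if none exists
theorem pvInnerA_eq_find (positions : List Int) (lengths : List Int) (mws : Int) (n : Nat) :
    ∀ k j, n - j ≤ k → j ≤ n →
      pvInnerA positions lengths mws n j
        = ((List.range' j (n - j)).find? (pvBrk positions lengths mws)).getD n := by
  intro k
  induction k with
  | zero =>
    intro j hk hj
    have hjn : j = n := by omega
    rw [pvInnerA]
    simp [hjn]
  | succ k ih =>
    intro j hk hj
    rw [pvInnerA]
    split
    · rename_i h
      have hn : n - j = (n - (j + 1)) + 1 := by omega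
      rw [hn, List.range'_succ]
      by_cases hb : positions.getD j 0 - (positions.getD (j - 1) 0 + lengths.getD (j - 1) 0) > mws
      · have hb' : pvBrk positions lengths mws j = true := by
          simpa [pvBrk, List.getD] using hb
        rw [List.find?_cons_of_pos hb', if_pos hb]
        simp
      · have hb' : ¬ pvBrk positions lengths mws j = true := by
          simpa [pvBrk, List.getD] using hb
        rw [List.find?_cons_of_neg hb', if_neg hb]
        exact ih (j + 1) (by omega) (by omega)
    · rename_i h
      have hjn : j = n := by omega
      simp [hjn]

-- find? = some on a range' splits the filter at the found element
theorem pvFilter_range'_split (p : Nat → Bool) :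
    ∀ k a b, (List.range' a k).find? p = some b →
      (List.range' a k).filter p = b :: (List.range' (b + 1) (a + k - (b + 1))).filter p := by
  intro k
  induction k with
  | zero => intro a b h; simp at h
  | succ k ih =>
    intro a b h
    rw [List.range'_succ] at *
    by_cases hp : p a = true
    · rw [List.find?_cons_of_pos hp] at h
      injection h with h; subst h
      rw [List.filter_cons_of_pos hp]
      have hc : a + (k + 1) - (a + 1) = k := by omega
      rw [hc]
    · rw [List.find?_cons_of_neg hp] at h
      rw [List.filter_cons_of_neg hp]
      have hc : a + (k + 1) - (b + 1) = a + 1 + k - (b + 1) := by omega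
      rw [hc]
      exact ih (a + 1) b h

-- the found break index lies in the range
theorem pvFind_mem_range' (p : Nat → Bool) (a k b : Nat)
    (h : (List.range' a k).find? p = some b) : a ≤ b ∧ b < a + k :=
  List.mem_range'_1.mp (List.mem_of_find?_eq_some h)

-- main invariant: from position i, A's outer loop produces the paired boundaries
-- i :: (breaks above i) ++ [n]
theorem pvOuterA_eq (positions : List Int) (lengths : List Int) (mws : Int) (n : Nat) :
    ∀ k i, n - i ≤ k → i < n →
      pvOuterA positions lengths mws n i
        = pvPairUp (i :: (List.range' (i + 1) (n - 1 - i)).filter (pvBrk positions lengths mws) ++ [n]) := by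
  intro k
  induction k with
  | zero => intro i hk hi; omega
  | succ k ih =>
    intro i hk hi
    rw [pvOuterA]
    simp only [hi, dif_pos]
    have hj := pvInnerA_eq_find positions lengths mws n (n - (i + 1)) (i + 1) (le_refl _) (by omega)
    have hrange : n - (i + 1) = n - 1 - i := by omega
    rw [hrange] at hj
    rcases hfind : (List.range' (i + 1) (n - 1 - i)).find? (pvBrk positions lengths mws) with _ | b
    · -- no break: block runs to n
      rw [hfind] at hj
      simp only [Option.getD_none] at hj
      have hfil : (List.range' (i + 1) (n - 1 - i)).filter (pvBrk positions lengths mws) = [] := by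
        apply List.filter_eq_nil_iff.mpr
        intro x hx
        exact List.find?_eq_none.mp hfind x hx
      rw [hj, hfil]
      rw [pvOuterA]
      simp [pvPairUp]
    · -- first break at b
      rw [hfind] at hj
      simp only [Option.getD_some] at hj
      have hb := pvFind_mem_range' _ _ _ _ hfind
      have hfil := pvFilter_range'_split (pvBrk positions lengths mws) (n - 1 - i) (i + 1) b hfind
      have harith : i + 1 + (n - 1 - i) - (b + 1) = n - 1 - b := by omega
      rw [harith] at hfil
      rw [hj, hfil]
      have hrec := ih b (by omega) (by omega)
      rw [hrec]
      simp [pvPairUp]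

-- ===== VERDICT (by name: the statement is the Claim_ definition above) =====
theorem find_contiguous_block_ranges_py_spec : Claim_equal_find_contiguous_block_ranges_py := by
  intro positions lengths mws _hdom _hpre
  unfold Spec_find_contiguous_block_ranges_py
  unfold find_contiguous_block_ranges_py find_contiguous_block_ranges_py_alt
  by_cases hn : positions.length = 0
  · rw [pvOuterA]
    simp [hn]
  · simp only [hn, ite_false]
    have := pvOuterA_eq positions lengths mws positions.length positions.length 0
      (by omega) (by omega)
    rw [this]
    norm_num
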